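-- pv_equiv track=rewrite | github.com/michell-lucino/robotme-script | robotme.py | trans_letter
-- ===== SOURCE A (Python) =====
-- import string, re
--
-- def trans_letter(t):  # Transform a single letter to a "special" one #
--     letters_dict = dict(enumerate(string.ascii_lowercase, 1))
--     letter_number = ''
--
--     for key, letter in letters_dict.items():
--         if letter == t[0]:
--             if key < 10:
--                 letter_number = '60' + str(key)
--             else:
--                 letter_number = '6' + str(key)
--
--     return chr(int(letter_number))  # ASCII codes that starts with 6 and has 4 numbers
-- ===== SOURCE B (Python) =====
-- def trans_letter(t):  # Transform a single letter to a "special" one #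
--     c = t[0]
--     if not ('a' <= c <= 'z'):
--         raise ValueError("not a lowercase letter: %r" % (c,))
--     # '60'+str(k) (k<10) and '6'+str(k) (k>=10) both denote 600+k, k = ord(c)-96
--     return chr(ord(c) + 504)
-- ===== Notes on version B (the rewrite author's own statement) =====
-- stated objective: simpler
-- what changed: Replaces the 26-entry enumerated dict and its full item scan (plus string concatenation and int/chr round-trip) with direct ASCII arithmetic chr(ord(c)+504) guarded by a lowercase range check.
-- outside the precondition, e.g. on trans_letter(''): A raises IndexError, B raises IndexError; on trans_letter('A'): A raises ValueError, B raises ValueError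
import Mathlib
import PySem

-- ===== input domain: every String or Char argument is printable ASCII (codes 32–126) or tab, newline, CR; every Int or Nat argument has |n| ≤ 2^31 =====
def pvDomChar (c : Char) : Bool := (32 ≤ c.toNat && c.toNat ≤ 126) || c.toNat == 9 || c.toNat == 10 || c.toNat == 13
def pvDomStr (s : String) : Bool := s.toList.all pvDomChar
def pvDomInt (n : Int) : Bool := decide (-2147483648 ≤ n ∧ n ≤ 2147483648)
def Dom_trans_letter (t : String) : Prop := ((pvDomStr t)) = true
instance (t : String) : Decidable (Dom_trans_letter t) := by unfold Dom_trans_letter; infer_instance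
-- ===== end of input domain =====

-- B replaces A's 26-entry dict scan by direct ASCII arithmetic (chr(ord(c)+504)); objective: simpler.

-- ===== PORT A =====
-- A: letters_dict = {1:'a',…,26:'z'}; scan its items, on match set letter_number; chr(int(letter_number)).
def trans_letter (t : String) : String :=
  match PySem.Str.pyGet? t 0 with
  | none => ""          -- t[0] raises IndexError (empty t); excluded by Pre_
  | some c =>
    let letter_number : String :=
      (List.range 26).foldl (fun acc (i : Nat) =>
        let key : Int := (i : Int) + 1
        let letter : Char := Char.ofNat (97 + i : Nat)
        if letter == c then
          if key < 10 then "60" ++ PySem.Int.toStr key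
          else "6" ++ PySem.Int.toStr key
        else acc) ""
    match PySem.Int.ofStr? letter_number with
    | none => ""        -- int('') raises ValueError (non-lowercase t[0]); excluded by Pre_
    | some n => String.ofList [Char.ofNat n.toNat]

-- ===== PORT B =====
-- B: c = t[0]; require 'a' ≤ c ≤ 'z' (else ValueError, excluded by Pre_); chr(ord(c)+504).
def trans_letter_alt (t : String) : String :=
  match PySem.Str.pyGet? t 0 with
  | none => ""          -- IndexError; excluded by Pre_
  | some c =>
    if 97 ≤ c.toNat ∧ c.toNat ≤ 122 then String.ofList [Char.ofNat (c.toNat + 504)]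
    else ""             -- ValueError; excluded by Pre_

-- ===== PRECONDITION & SPEC =====
-- Pre_ excludes exactly the inputs where A raises: empty t (IndexError from t[0]) and
-- a first character that is not a lowercase ASCII letter (ValueError from int('')).
def Pre_trans_letter (t : String) : Prop :=
  t.toList ≠ [] ∧ 97 ≤ t.toList.headI.toNat ∧ t.toList.headI.toNat ≤ 122
instance (t : String) : Decidable (Pre_trans_letter t) := by unfold Pre_trans_letter; infer_instance
def pvWitness_trans_letter : String := "q"

def Spec_trans_letter (t : String) (out : String) : Prop := out = trans_letter_alt t
instance (t : String) (out : String) : Decidable (Spec_trans_letter t out) := by unfold Spec_trans_letter; infer_instance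

-- ===== CLAIM (what is proved, stated in full; the proofs are below) =====
def Claim_equal_trans_letter : Prop := ∀ (t : String), Dom_trans_letter t → Pre_trans_letter t → Spec_trans_letter t (trans_letter t)

-- ===== LEMMAS AND PROOFS =====
-- Both ports depend only on the first character; for each of the 26 lowercase letters the
-- two bodies agree, checked by kernel evaluation.
theorem trans_letter_first_char (c : Char) (rest : List Char)
    (h1 : 97 ≤ c.toNat) (h2 : c.toNat ≤ 122) :
    trans_letter (String.ofList (c :: rest)) = trans_letter_alt (String.ofList (c :: rest)) := by
  have hget : PySem.Str.pyGet? (String.ofList (c :: rest)) 0 = some c := by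
    simp [PySem.Str.pyGet?, String.toList_ofList]
  have hc : c = Char.ofNat c.toNat := (Char.ofNat_toNat c).symm
  unfold trans_letter trans_letter_alt
  rw [hget]
  set n := c.toNat with hn
  rw [hc]
  clear_value n
  clear hc hn hget
  interval_cases n <;> decide

-- ===== VERDICT (by name: the statement is the Claim_ definition above) =====
theorem trans_letter_spec : Claim_equal_trans_letter := by
  intro t _ hpre
  obtain ⟨hne, h1, h2⟩ := hpre
  unfold Spec_trans_letter
  cases hl : t.toList with
  | nil => exact absurd hl hne
  | cons c rest =>
    have ht : t = String.ofList (c :: rest) := by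
      rw [← hl, String.ofList_toList]
    rw [hl] at h1 h2
    simp [List.headI] at h1 h2
    rw [ht]
    exact trans_letter_first_char c rest h1 h2
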